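-- pv_equiv track=rewrite | github.com/Do-heewan/Do_ProgrammingTest | 프로그래머스/3/388354. 홀짝트리/홀짝트리.py | solution
-- ===== SOURCE A (Python) =====
-- from collections import defaultdict
--
-- def solution(nodes, edges):
--     # root가 짝수 = root가 아니면 역짝수
--     # root가 홀수 = root가 아니면 역홀수
--     # root가 역짝수 = root가 아니면 짝수
--     # root가 역홀수 = root가 아니면 홀수
--     # 홀짝 트리 => root만 홀짝이고, 나머지는 전부 역홀짝이어야 한다.
--       # root가 결정되면, 나머지 노드는 전부 leaf가 하나씩 빠지기 때문.
--     # 역홀짝 트리 => root만 역홀짝이고, 나머지는 전부 홀짝트리.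
--
--     def check_node(table, node, visited, stats):
--         # stats = [0, 0, 0, 0]. odd노드 개수, even노드 개수, 역홀수노드 개수, 역짝수노드 개수.
--         visited.add(node)
--
--         # 홀수 노드
--         if node % 2 == 1 and len(table[node]) % 2 == 1:
--             stats[0] += 1
--         # 짝수 노드
--         if node % 2 == 0 and len(table[node]) % 2 == 0:
--             stats[1] += 1
--         # 역홀수 노드
--         if node % 2 == 1 and len(table[node]) % 2 == 0:
--             stats[2] += 1
--         # 역짝수 노드
--         if node % 2 == 0 and len(table[node]) % 2 == 1:
--             stats[3] += 1
--
--         for n in table[node]: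
--             if n in visited:
--                 continue
--             check_node(table, n, visited, stats)
--         return
--
--     tables = defaultdict(set)
--     for edge in edges:
--         node1, node2 = edge[0], edge[1]
--         tables[node1].add(node2)
--         tables[node2].add(node1)
--
--     visited = set()
--     answer = [0, 0]
--     for node in nodes:
--         if node not in visited:
--             visited.add(node)
--             stats = [0, 0, 0, 0]
--             check_node(tables, node, visited, stats)
--             # 홀수노드 1, 짝수노드 0일 경우 or 홀수노드 0, 짝수노드 1일 경우 -> 홀짝 트리 가능.
--             #  (홀짝노드를 루트로 선택하면, 나머지 역홀짝노드의 leaf가 1 줄어들면서 전부 홀짝노드가 된다)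
--             if (stats[0] + stats[1]) == 1:
--                 answer[0] += 1
--             # 역홀수노드 1, 역짝수노드 0일 경우 or 역홀수노드 0, 역짝수노드 1일 경우 -> 역홀짝 트리 가능
--             #  역홀짝노드를 root로 선택하면, 나머지 홀짝노드가 전부 역홀짝노드로 변경되기 때문
--             if (stats[2] + stats[3]) == 1:
--                 answer[1] += 1
--     return answer
-- ===== SOURCE B (Python) =====
-- def solution(nodes, edges):
--     # Build deduplicated adjacency (same degrees as A's set-based table).
--     adj = {}
--     for e in edges:
--         a, b = e[0], e[1]
--         adj.setdefault(a, set()).add(b)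
--         adj.setdefault(b, set()).add(a)
--
--     seen = set()
--     ans0 = 0
--     ans1 = 0
--     for v in nodes:
--         if v in seen:
--             continue
--         # collect the whole component with an iterative BFS queue
--         comp = [v]
--         seen.add(v)
--         i = 0
--         while i < len(comp):
--             u = comp[i]
--             i += 1
--             for w in adj.get(u, ()):
--                 if w not in seen:
--                     seen.add(w)
--                     comp.append(w)
--         # k = nodes whose value parity matches their degree parity
--         k = sum(1 for u in comp if u % 2 == len(adj.get(u, ())) % 2)
--         if k == 1:
--             ans0 += 1
--         if len(comp) - k == 1:
--             ans1 += 1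
--     return [ans0, ans1]
-- ===== Notes on version B (the rewrite author's own statement) =====
-- stated objective: alternative
-- what changed: Replaces A's recursive DFS that mutates four parity counters during the walk with an iterative BFS queue that first collects each component and then counts only two quantities (component size and nodes whose value parity equals their degree parity), from which both answers follow.
import Mathlib
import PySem

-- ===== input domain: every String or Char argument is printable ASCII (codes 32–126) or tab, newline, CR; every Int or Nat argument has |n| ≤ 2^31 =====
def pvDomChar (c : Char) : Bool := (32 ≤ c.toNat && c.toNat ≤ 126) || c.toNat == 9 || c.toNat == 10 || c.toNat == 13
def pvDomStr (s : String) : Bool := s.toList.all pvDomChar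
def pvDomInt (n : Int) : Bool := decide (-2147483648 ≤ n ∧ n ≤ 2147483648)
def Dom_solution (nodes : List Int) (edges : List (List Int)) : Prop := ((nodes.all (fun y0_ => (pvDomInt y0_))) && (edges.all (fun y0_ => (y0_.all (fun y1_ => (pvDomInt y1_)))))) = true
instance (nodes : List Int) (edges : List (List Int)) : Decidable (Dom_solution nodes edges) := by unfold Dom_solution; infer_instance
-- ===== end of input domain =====

-- B replaces A's recursive DFS with four parity counters by an iterative BFS queue per
-- component plus two derived counts (objective: alternative; same asymptotic cost).

-- ===== PORT A =====

-- tables = defaultdict(set); for edge in edges: tables[edge[0]].add(edge[1]); tables[edge[1]].add(edge[0])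
def pvTable (edges : List (List Int)) : PySem.Dict Int (PySem.Set Int) :=
  edges.foldl (fun t e =>
    let n1 := PySem.List.pyGetD e 0 0
    let n2 := PySem.List.pyGetD e 1 0
    let t1 := t.insert n1 (PySem.Set.add (t.getD n1 PySem.Set.empty) n2)
    t1.insert n2 (PySem.Set.add (t1.getD n2 PySem.Set.empty) n1)) PySem.Dict.empty

-- check_node: recursive DFS mutating (visited, stats); fuel only guards termination
def pvCheckNode (table : PySem.Dict Int (PySem.Set Int)) :
    Nat → Int → PySem.Set Int → Int × Int × Int × Int →
    PySem.Set Int × (Int × Int × Int × Int)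
  | 0, _, visited, stats => (visited, stats)
  | fuel+1, node, visited, stats =>
    let visited1 := PySem.Set.add visited node
    let deg : Int := ((table.getD node PySem.Set.empty).length : Int)
    let s0 := if PySem.Int.mod node 2 = 1 ∧ PySem.Int.mod deg 2 = 1 then stats.1 + 1 else stats.1
    let s1 := if PySem.Int.mod node 2 = 0 ∧ PySem.Int.mod deg 2 = 0 then stats.2.1 + 1 else stats.2.1
    let s2 := if PySem.Int.mod node 2 = 1 ∧ PySem.Int.mod deg 2 = 0 then stats.2.2.1 + 1 else stats.2.2.1
    let s3 := if PySem.Int.mod node 2 = 0 ∧ PySem.Int.mod deg 2 = 1 then stats.2.2.2 + 1 else stats.2.2.2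
    (table.getD node PySem.Set.empty).foldl
      (fun st n =>
        if PySem.Set.contains st.1 n then st
        else pvCheckNode table fuel n st.1 st.2)
      (visited1, (s0, s1, s2, s3))

def solution (nodes : List Int) (edges : List (List Int)) : List Int :=
  let table := pvTable edges
  let fin := nodes.foldl
    (fun (st : PySem.Set Int × Int × Int) node =>
      if PySem.Set.contains st.1 node then st
      else
        let r := pvCheckNode table (nodes.length + 2 * edges.length + 1) node
                   (PySem.Set.add st.1 node) (0, 0, 0, 0)
        let a0 := if r.2.1 + r.2.2.1 = 1 then st.2.1 + 1 else st.2.1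
        let a1 := if r.2.2.2.1 + r.2.2.2.2 = 1 then st.2.2 + 1 else st.2.2
        (r.1, a0, a1))
    (PySem.Set.empty, 0, 0)
  [fin.2.1, fin.2.2]

-- ===== PORT B =====

-- adj = {}; for e in edges: adj.setdefault(e[0], set()).add(e[1]); adj.setdefault(e[1], set()).add(e[0])
def pvAdj (edges : List (List Int)) : PySem.Dict Int (PySem.Set Int) :=
  edges.foldl (fun t e =>
    let a := PySem.List.pyGetD e 0 0
    let b := PySem.List.pyGetD e 1 0
    let t1 := t.insert a (PySem.Set.add (t.getD a PySem.Set.empty) b)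
    t1.insert b (PySem.Set.add (t1.getD b PySem.Set.empty) a)) PySem.Dict.empty

-- while i < len(comp): u = comp[i]; i += 1; for w in adj.get(u, ()): if w not in seen: seen.add(w); comp.append(w)
def pvBfs (adj : PySem.Dict Int (PySem.Set Int)) :
    Nat → Nat → List Int → PySem.Set Int → List Int × PySem.Set Int
  | 0, _, comp, seen => (comp, seen)
  | fuel+1, i, comp, seen =>
    if i < comp.length then
      let u := comp.getD i 0
      let st := (adj.getD u PySem.Set.empty).foldl
        (fun (st : List Int × PySem.Set Int) w =>
          if PySem.Set.contains st.2 w then st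
          else (st.1 ++ [w], PySem.Set.add st.2 w))
        (comp, seen)
      pvBfs adj fuel (i+1) st.1 st.2
    else (comp, seen)

def solution_alt (nodes : List Int) (edges : List (List Int)) : List Int :=
  let adj := pvAdj edges
  let fin := nodes.foldl
    (fun (st : PySem.Set Int × Int × Int) v =>
      if PySem.Set.contains st.1 v then st
      else
        let r := pvBfs adj (nodes.length + 2 * edges.length + 1) 0 [v] (PySem.Set.add st.1 v)
        let comp := r.1
        let k : Int := (comp.countP (fun u =>
          PySem.Int.mod u 2 == PySem.Int.mod ((adj.getD u PySem.Set.empty).length : Int) 2) : Int)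
        let b0 := if k = 1 then st.2.1 + 1 else st.2.1
        let b1 := if (comp.length : Int) - k = 1 then st.2.2 + 1 else st.2.2
        (r.2, b0, b1))
    (PySem.Set.empty, 0, 0)
  [fin.2.1, fin.2.2]

-- ===== PRECONDITION & SPEC =====
-- Pre_ excludes only edge records with fewer than two entries, on which Python A
-- raises IndexError at edge[0]/edge[1] (B raises there too).
def Pre_solution (nodes : List Int) (edges : List (List Int)) : Prop :=
  ∀ e ∈ edges, 2 ≤ e.length
instance (nodes : List Int) (edges : List (List Int)) : Decidable (Pre_solution nodes edges) := by
  unfold Pre_solution; infer_instance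
def pvWitness_solution : List Int × List (List Int) := ([1, 2, 3, 7], [[1, 2], [2, 3]])

def Spec_solution (nodes : List Int) (edges : List (List Int)) (out : List Int) : Prop := out = solution_alt nodes edges
instance (nodes : List Int) (edges : List (List Int)) (out : List Int) : Decidable (Spec_solution nodes edges out) := by unfold Spec_solution; infer_instance

-- ===== CLAIM (what is proved, stated in full; the proofs are below) =====
def Claim_equal_solution : Prop := ∀ (nodes : List Int) (edges : List (List Int)), Dom_solution nodes edges → Pre_solution nodes edges → Spec_solution nodes edges (solution nodes edges)

-- ===== LEMMAS AND PROOFS =====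

-- proof-only helpers
def pvAdjL (T : PySem.Dict Int (PySem.Set Int)) (x : Int) : List Int :=
  (T.getD x PySem.Set.empty : List Int)

def pvReach (T : PySem.Dict Int (PySem.Set Int)) (v x : Int) : Prop :=
  Relation.ReflTransGen (fun a b => b ∈ pvAdjL T a) v x

def pvDeg (T : PySem.Dict Int (PySem.Set Int)) (u : Int) : Int :=
  ((T.getD u PySem.Set.empty).length : Int)

def pvP0 (T : PySem.Dict Int (PySem.Set Int)) (u : Int) : Bool :=
  decide (PySem.Int.mod u 2 = 1 ∧ PySem.Int.mod (pvDeg T u) 2 = 1)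
def pvP1 (T : PySem.Dict Int (PySem.Set Int)) (u : Int) : Bool :=
  decide (PySem.Int.mod u 2 = 0 ∧ PySem.Int.mod (pvDeg T u) 2 = 0)
def pvP2 (T : PySem.Dict Int (PySem.Set Int)) (u : Int) : Bool :=
  decide (PySem.Int.mod u 2 = 1 ∧ PySem.Int.mod (pvDeg T u) 2 = 0)
def pvP3 (T : PySem.Dict Int (PySem.Set Int)) (u : Int) : Bool :=
  decide (PySem.Int.mod u 2 = 0 ∧ PySem.Int.mod (pvDeg T u) 2 = 1)
def pvPB (T : PySem.Dict Int (PySem.Set Int)) (u : Int) : Bool :=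
  PySem.Int.mod u 2 == PySem.Int.mod (pvDeg T u) 2

def pvUnseen (W V : List Int) : Nat := (W.filter (fun x => decide (x ∉ V))).length

def pvE0 (e : List Int) : Int := PySem.List.pyGetD e 0 0
def pvE1 (e : List Int) : Int := PySem.List.pyGetD e 1 0

def pvW (nodes : List Int) (edges : List (List Int)) : List Int :=
  PySem.Set.ofList (nodes ++ edges.flatMap (fun e => [pvE0 e, pvE1 e]))

-- small Set utilities
theorem pvAdd_of_mem {s : List Int} {x : Int} (h : x ∈ s) : PySem.Set.add s x = s := by
  unfold PySem.Set.add PySem.Set.contains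
  simp [List.contains_eq_mem, h]
theorem pvAdd_of_not_mem {s : List Int} {x : Int} (h : x ∉ s) :
    PySem.Set.add s x = s ++ [x] := by
  unfold PySem.Set.add PySem.Set.contains
  simp [List.contains_eq_mem, h]

theorem pvUnseen_cons (a : Int) (W V : List Int) :
    pvUnseen (a :: W) V = (if a ∈ V then 0 else 1) + pvUnseen W V := by
  unfold pvUnseen
  by_cases h : a ∈ V <;> simp [List.filter_cons, h] <;> omega

-- pvUnseen monotone / strict / exact decrement
theorem pvUnseen_mono (W : List Int) {V V' : List Int} (h : ∀ x ∈ V, x ∈ V') :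
    pvUnseen W V' ≤ pvUnseen W V := by
  induction W with
  | nil => simp [pvUnseen]
  | cons a W ih =>
    rw [pvUnseen_cons, pvUnseen_cons]
    by_cases haV : a ∈ V
    · simp only [haV, h a haV, if_true]; omega
    · by_cases haV' : a ∈ V' <;> simp only [haV, haV', if_true, if_false] <;> omega
theorem pvUnseen_strict (W : List Int) {V V' : List Int} (hsub : ∀ x ∈ V, x ∈ V')
    {w : Int} (hwW : w ∈ W) (hwV : w ∉ V) (hwV' : w ∈ V') :
    pvUnseen W V' < pvUnseen W V := by
  induction W with
  | nil => simp at hwW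
  | cons a W ih =>
    rw [pvUnseen_cons, pvUnseen_cons]
    have h1 : pvUnseen W V' ≤ pvUnseen W V := pvUnseen_mono W hsub
    rcases List.mem_cons.mp hwW with rfl | haW
    · simp only [hwV, hwV', if_true, if_false]; omega
    · have h2 := ih haW
      by_cases haV : a ∈ V
      · simp only [haV, hsub a haV, if_true]; omega
      · by_cases haV' : a ∈ V' <;> simp only [haV, haV', if_true, if_false] <;> omega
theorem pvUnseen_append_one {W : List Int} (hnd : W.Nodup) {V : List Int} {w : Int}
    (hwW : w ∈ W) (hwV : w ∉ V) : pvUnseen W (V ++ [w]) + 1 = pvUnseen W V := by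
  induction W with
  | nil => simp at hwW
  | cons a W ih =>
    rw [pvUnseen_cons, pvUnseen_cons]
    rcases List.mem_cons.mp hwW with rfl | haW
    · have hnw : w ∉ W := (List.nodup_cons.mp hnd).1
      have hfeq : pvUnseen W (V ++ [w]) = pvUnseen W V := by
        unfold pvUnseen
        congr 1
        apply List.filter_congr
        intro x hx
        have hxw : x ≠ w := fun h => hnw (h ▸ hx)
        simp [List.mem_append, hxw]
      have hw1 : w ∈ V ++ [w] := by simp
      simp only [hw1, hwV, if_true, if_false, hfeq]
      omega
    · have h1 := ih (List.nodup_cons.mp hnd).2 haW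
      by_cases haw : a = w
      · exact absurd (haw ▸ haW) (List.nodup_cons.mp hnd).1
      · have hmem : a ∈ V ++ [w] ↔ a ∈ V := by simp [haw]
        by_cases haV : a ∈ V
        · simp only [hmem.mpr haV, haV, if_true]; omega
        · have : a ∉ V ++ [w] := fun h => haV (hmem.mp h)
          simp only [haV, this, if_false]
          omega
theorem pvUnseen_lt_length {W V : List Int} {w : Int} (hwW : w ∈ W) (hwV : w ∈ V) :
    pvUnseen W V < W.length := by
  unfold pvUnseen
  rw [List.length_filter_lt_length_iff_exists]
  exact ⟨w, hwW, by simp [hwV]⟩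

-- adjacency characterization of the built table
theorem pvTable_step (d : PySem.Dict Int (PySem.Set Int)) (e : List Int) (x y : Int) :
    y ∈ ((let n1 := PySem.List.pyGetD e 0 0
          let n2 := PySem.List.pyGetD e 1 0
          let t1 := d.insert n1 (PySem.Set.add (d.getD n1 PySem.Set.empty) n2)
          t1.insert n2 (PySem.Set.add (t1.getD n2 PySem.Set.empty) n1)).getD x PySem.Set.empty : List Int)
      ↔ y ∈ (d.getD x PySem.Set.empty : List Int) ∨
        (x = pvE0 e ∧ y = pvE1 e) ∨ (x = pvE1 e ∧ y = pvE0 e) := by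
  show y ∈ (((d.insert (pvE0 e) (PySem.Set.add (d.getD (pvE0 e) PySem.Set.empty) (pvE1 e))).insert
      (pvE1 e) (PySem.Set.add ((d.insert (pvE0 e)
        (PySem.Set.add (d.getD (pvE0 e) PySem.Set.empty) (pvE1 e))).getD (pvE1 e) PySem.Set.empty)
        (pvE0 e))).getD x PySem.Set.empty : List Int) ↔ _
  set a := pvE0 e with ha
  set b := pvE1 e with hb
  by_cases hxb : x = b
  · rw [hxb, PySem.Dict.getD_insert, if_pos rfl, PySem.Dict.getD_insert]
    by_cases hba : b = a
    · rw [if_pos hba, hba, PySem.Set.mem_add, PySem.Set.mem_add]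
      tauto
    · rw [if_neg hba, PySem.Set.mem_add]
      have hab : ¬ (b = a ∧ y = b) := fun h => hba h.1
      tauto
  · rw [PySem.Dict.getD_insert, if_neg hxb, PySem.Dict.getD_insert]
    by_cases hxa : x = a
    · rw [if_pos hxa, PySem.Set.mem_add, hxa]
      have h1 : ¬ (x = b) := hxb
      have h2 : ¬ (a = b ∧ y = a) := fun h => hxb (hxa.trans h.1)
      tauto
    · rw [if_neg hxa]
      have h1 : ¬ (x = a ∧ y = b) := fun h => hxa h.1
      have h2 : ¬ (x = b ∧ y = a) := fun h => hxb h.1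
      tauto

theorem pvTable_mem (edges : List (List Int)) (x y : Int) :
    y ∈ pvAdjL (pvTable edges) x ↔
      ∃ e ∈ edges, (x = pvE0 e ∧ y = pvE1 e) ∨ (x = pvE1 e ∧ y = pvE0 e) := by
  unfold pvAdjL pvTable
  have main : ∀ (l : List (List Int)) (d : PySem.Dict Int (PySem.Set Int)),
      y ∈ ((l.foldl (fun t e =>
        let n1 := PySem.List.pyGetD e 0 0
        let n2 := PySem.List.pyGetD e 1 0
        let t1 := t.insert n1 (PySem.Set.add (t.getD n1 PySem.Set.empty) n2)
        t1.insert n2 (PySem.Set.add (t1.getD n2 PySem.Set.empty) n1)) d).getD x PySem.Set.empty : List Int)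
      ↔ y ∈ (d.getD x PySem.Set.empty : List Int) ∨
        ∃ e ∈ l, (x = pvE0 e ∧ y = pvE1 e) ∨ (x = pvE1 e ∧ y = pvE0 e) := by
    intro l
    induction l with
    | nil => simp
    | cons e l ih =>
      intro d
      rw [List.foldl_cons, ih, pvTable_step d e x y]
      simp only [List.mem_cons]
      constructor
      · rintro (( h | h ) | ⟨e', he', h⟩)
        · exact Or.inl h
        · exact Or.inr ⟨e, Or.inl rfl, h⟩
        · exact Or.inr ⟨e', Or.inr he', h⟩
      · rintro (h | ⟨e', (rfl | he'), h⟩)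
        · exact Or.inl (Or.inl h)
        · exact Or.inl (Or.inr h)
        · exact Or.inr ⟨e', he', h⟩
  rw [main edges PySem.Dict.empty]
  simp [PySem.Dict.getD_empty, PySem.Set.empty]

theorem pvTable_sym (edges : List (List Int)) {x y : Int}
    (h : y ∈ pvAdjL (pvTable edges) x) : x ∈ pvAdjL (pvTable edges) y := by
  rw [pvTable_mem] at h ⊢
  obtain ⟨e, he, h⟩ := h
  exact ⟨e, he, by tauto⟩

theorem pvAdj_mem_W (nodes : List Int) (edges : List (List Int)) {x y : Int}
    (h : y ∈ pvAdjL (pvTable edges) x) : y ∈ pvW nodes edges := by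
  rw [pvTable_mem] at h
  obtain ⟨e, he, h⟩ := h
  unfold pvW
  rw [PySem.Set.mem_ofList, List.mem_append]
  refine Or.inr (List.mem_flatMap.mpr ⟨e, he, ?_⟩)
  rcases h with ⟨_, rfl⟩ | ⟨_, rfl⟩ <;> simp

theorem pvW_length_le (nodes : List Int) (edges : List (List Int)) :
    (pvW nodes edges).length ≤ nodes.length + 2 * edges.length := by
  unfold pvW
  refine le_trans (PySem.Set.length_ofList_le _) ?_
  rw [List.length_append]
  have : (edges.flatMap (fun e => [pvE0 e, pvE1 e])).length = 2 * edges.length := by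
    induction edges with
    | nil => simp
    | cons e l ih => simp [List.flatMap_cons, ih]; omega
  omega

-- counting helpers
theorem pvCountP_split (T : PySem.Dict Int (PySem.Set Int)) (l : List Int) :
    l.countP (pvP0 T) + l.countP (pvP1 T) = l.countP (pvPB T) ∧
    l.countP (pvP2 T) + l.countP (pvP3 T) + l.countP (pvPB T) = l.length := by
  induction l with
  | nil => simp
  | cons u l ih =>
    have hu2 : PySem.Int.mod u 2 = 0 ∨ PySem.Int.mod u 2 = 1 := by
      have h1 := PySem.Int.mod_nonneg u (b := 2) (by omega)
      have h2 := PySem.Int.mod_lt u (b := 2) (by omega)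
      omega
    have hd2 : PySem.Int.mod (pvDeg T u) 2 = 0 ∨ PySem.Int.mod (pvDeg T u) 2 = 1 := by
      have h1 := PySem.Int.mod_nonneg (pvDeg T u) (b := 2) (by omega)
      have h2 := PySem.Int.mod_lt (pvDeg T u) (b := 2) (by omega)
      omega
    obtain ⟨ih1, ih2⟩ := ih
    have e0 : pvP0 T u = decide (PySem.Int.mod u 2 = 1 ∧ PySem.Int.mod (pvDeg T u) 2 = 1) := rfl
    have e1 : pvP1 T u = decide (PySem.Int.mod u 2 = 0 ∧ PySem.Int.mod (pvDeg T u) 2 = 0) := rfl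
    have e2 : pvP2 T u = decide (PySem.Int.mod u 2 = 1 ∧ PySem.Int.mod (pvDeg T u) 2 = 0) := rfl
    have e3 : pvP3 T u = decide (PySem.Int.mod u 2 = 0 ∧ PySem.Int.mod (pvDeg T u) 2 = 1) := rfl
    have eB : pvPB T u = (PySem.Int.mod u 2 == PySem.Int.mod (pvDeg T u) 2) := rfl
    simp only [List.countP_cons, List.length_cons, e0, e1, e2, e3, eB]
    rcases hu2 with h | h <;> rcases hd2 with h' | h' <;>
      simp only [h, h', beq_iff_eq] <;> norm_num <;> omega

theorem pvCountP_perm_of_mem_iff {l₁ l₂ : List Int} (h₁ : l₁.Nodup) (h₂ : l₂.Nodup)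
    (h : ∀ x, x ∈ l₁ ↔ x ∈ l₂) (p : Int → Bool) :
    l₁.countP p = l₂.countP p ∧ l₁.length = l₂.length := by
  have hperm : l₁.Perm l₂ := (List.perm_ext_iff_of_nodup h₁ h₂).mpr h
  exact ⟨hperm.countP_eq p, hperm.length_eq⟩

-- maximality: a relatively closed set reaching from v contains everything reachable from v
theorem pvComp_max (T : PySem.Dict Int (PySem.Set Int))
    (hsym : ∀ a b, b ∈ pvAdjL T a → a ∈ pvAdjL T b)
    (V₀ S : List Int) (hdisj : ∀ x ∈ S, x ∉ V₀)
    (hcl₀ : ∀ x ∈ V₀, ∀ y ∈ pvAdjL T x, y ∈ V₀)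
    (hclS : ∀ x ∈ S, ∀ y ∈ pvAdjL T x, y ∈ V₀ ∨ y ∈ S)
    {v : Int} (hv : v ∈ S) : ∀ x, pvReach T v x → x ∈ S := by
  intro x h
  induction h with
  | refl => exact hv
  | tail _ hstep ih =>
    rename_i b c _
    rcases hclS b ih c hstep with hc | hc
    · exact absurd (hcl₀ c hc b (hsym b c hstep)) (hdisj b ih)
    · exact hc

-- ===== the DFS side =====

def pvDfsSpec (T : PySem.Dict Int (PySem.Set Int)) (W : List Int) (fuel : Nat) : Prop :=
  ∀ (node : Int) (visited : List Int) (stats : Int × Int × Int × Int),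
    node ∈ W → visited.Nodup →
    pvUnseen W (PySem.Set.add visited node) < fuel →
    ∃ Δ : List Int,
      pvCheckNode T fuel node visited stats =
        (visited ++ Δ,
         (stats.1 + ((if visited.contains node then node :: Δ else Δ).countP (pvP0 T) : Int),
          stats.2.1 + ((if visited.contains node then node :: Δ else Δ).countP (pvP1 T) : Int),
          stats.2.2.1 + ((if visited.contains node then node :: Δ else Δ).countP (pvP2 T) : Int),
          stats.2.2.2 + ((if visited.contains node then node :: Δ else Δ).countP (pvP3 T) : Int))) ∧
      (visited ++ Δ).Nodup ∧
      (∀ x ∈ Δ, x ∈ W ∧ pvReach T node x) ∧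
      (∀ x ∈ (if visited.contains node then node :: Δ else Δ),
        ∀ y ∈ pvAdjL T x, y ∈ visited ++ Δ) ∧
      node ∈ visited ++ Δ

theorem pvCheckFold_spec (T : PySem.Dict Int (PySem.Set Int)) (W : List Int)
    (hW : ∀ x y, y ∈ pvAdjL T x → y ∈ W) (fuel : Nat) (IH : pvDfsSpec T W fuel) :
    ∀ (ns : List Int) (v : List Int) (stats : Int × Int × Int × Int),
      (∀ n ∈ ns, n ∈ W) → v.Nodup → pvUnseen W v ≤ fuel →
      ∃ Δ : List Int,
        ns.foldl (fun st n => if PySem.Set.contains st.1 n then st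
                              else pvCheckNode T fuel n st.1 st.2) (v, stats) =
          (v ++ Δ,
           (stats.1 + (Δ.countP (pvP0 T) : Int), stats.2.1 + (Δ.countP (pvP1 T) : Int),
            stats.2.2.1 + (Δ.countP (pvP2 T) : Int), stats.2.2.2 + (Δ.countP (pvP3 T) : Int))) ∧
        (v ++ Δ).Nodup ∧
        (∀ x ∈ Δ, x ∈ W ∧ ∃ n ∈ ns, pvReach T n x) ∧
        (∀ x ∈ Δ, ∀ y ∈ pvAdjL T x, y ∈ v ++ Δ) ∧
        (∀ n ∈ ns, n ∈ v ++ Δ) := by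
  intro ns
  induction ns with
  | nil =>
    intro v stats hns hnd hb
    exact ⟨[], by simp, by simpa using hnd, by simp, by simp, by simp⟩
  | cons n ns ih =>
    intro v stats hns hnd hb
    rw [List.foldl_cons]
    by_cases hn : n ∈ v
    · have hg : PySem.Set.contains v n = true := (PySem.Set.contains_iff v n).mpr hn
      rw [if_pos hg]
      obtain ⟨Δ, heq, hnd', hre, hcl, hmem⟩ := ih v stats (fun m hm => hns m (List.mem_cons_of_mem n hm)) hnd hb
      refine ⟨Δ, heq, hnd', ?_, hcl, ?_⟩
      · intro x hx
        obtain ⟨hxW, n', hn', hr⟩ := hre x hx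
        exact ⟨hxW, n', List.mem_cons_of_mem n hn', hr⟩
      · intro m hm
        rcases List.mem_cons.mp hm with rfl | hm
        · exact List.mem_append.mpr (Or.inl hn)
        · exact hmem m hm
    · have hg : PySem.Set.contains v n = false := by
        simp only [PySem.Set.contains, List.contains_eq_mem]
        simpa using hn
      rw [if_neg (by rw [hg]; simp)]
      have hnW : n ∈ W := hns n (List.mem_cons_self ..)
      have hb1 : pvUnseen W (PySem.Set.add v n) < fuel := by
        have := pvUnseen_strict W (V := v) (V' := PySem.Set.add v n)
          (fun x hx => (PySem.Set.mem_add v n x).mpr (Or.inl hx)) hnW hn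
          ((PySem.Set.mem_add v n n).mpr (Or.inr rfl))
        omega
      obtain ⟨Δ₁, heq₁, hnd₁, hre₁, hcl₁, hself₁⟩ := IH n v stats hnW hnd hb1
      have hcont : v.contains n = false := by simpa [List.contains_eq_mem] using hn
      rw [hcont] at heq₁ hcl₁
      simp only [Bool.false_eq_true, if_false] at heq₁ hcl₁
      rw [heq₁]
      have hb2 : pvUnseen W (v ++ Δ₁) ≤ fuel := by
        have hmono := pvUnseen_mono W (V := PySem.Set.add v n) (V' := v ++ Δ₁)
          (fun x hx => by
            rcases (PySem.Set.mem_add v n x).mp hx with hx | rfl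
            · exact List.mem_append.mpr (Or.inl hx)
            · exact hself₁)
        omega
      obtain ⟨Δ₂, heq₂, hnd₂, hre₂, hcl₂, hmem₂⟩ :=
        ih (v ++ Δ₁) _ (fun m hm => hns m (List.mem_cons_of_mem n hm)) hnd₁ hb2
      refine ⟨Δ₁ ++ Δ₂, ?_, ?_, ?_, ?_, ?_⟩
      · rw [heq₂]
        refine Prod.ext ?_ ?_
        · simp [List.append_assoc]
        · simp only [List.countP_append]
          refine Prod.ext ?_ (Prod.ext ?_ (Prod.ext ?_ ?_)) <;> push_cast <;> ring
      · rw [← List.append_assoc]; exact hnd₂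
      · intro x hx
        rcases List.mem_append.mp hx with hx | hx
        · obtain ⟨hxW, hr⟩ := hre₁ x hx
          exact ⟨hxW, n, List.mem_cons_self .., hr⟩
        · obtain ⟨hxW, n', hn', hr⟩ := hre₂ x hx
          exact ⟨hxW, n', List.mem_cons_of_mem n hn', hr⟩
      · intro x hx y hy
        rw [← List.append_assoc]
        rcases List.mem_append.mp hx with hx | hx
        · exact List.mem_append.mpr (Or.inl (hcl₁ x hx y hy))
        · exact hcl₂ x hx y hy
      · intro m hm
        rw [← List.append_assoc]
        rcases List.mem_cons.mp hm with rfl | hm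
        · exact List.mem_append.mpr (Or.inl hself₁)
        · exact hmem₂ m hm

theorem pvCheckNode_spec (T : PySem.Dict Int (PySem.Set Int)) (W : List Int)
    (hW : ∀ x y, y ∈ pvAdjL T x → y ∈ W) : ∀ fuel, pvDfsSpec T W fuel := by
  intro fuel
  induction fuel with
  | zero => intro node visited stats _ _ hb; omega
  | succ fuel IH =>
    intro node visited stats hnW hnd hb
    have hns : ∀ n ∈ pvAdjL T node, n ∈ W := fun n hn => hW node n hn
    have hndv : (PySem.Set.add visited node).Nodup := PySem.Set.nodup_add visited node hnd
    have hb' : pvUnseen W (PySem.Set.add visited node) ≤ fuel := by omega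
    obtain ⟨Δa, heq, hnd', hre, hcl, hmem⟩ :=
      pvCheckFold_spec T W hW fuel IH (pvAdjL T node) (PySem.Set.add visited node)
        ((if pvP0 T node then stats.1 + 1 else stats.1),
         (if pvP1 T node then stats.2.1 + 1 else stats.2.1),
         (if pvP2 T node then stats.2.2.1 + 1 else stats.2.2.1),
         (if pvP3 T node then stats.2.2.2 + 1 else stats.2.2.2)) hns hndv hb'
    have hunf : pvCheckNode T (fuel+1) node visited stats =
        (pvAdjL T node).foldl (fun st n => if PySem.Set.contains st.1 n then st
            else pvCheckNode T fuel n st.1 st.2)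
          (PySem.Set.add visited node,
           ((if pvP0 T node then stats.1 + 1 else stats.1),
            (if pvP1 T node then stats.2.1 + 1 else stats.2.1),
            (if pvP2 T node then stats.2.2.1 + 1 else stats.2.2.1),
            (if pvP3 T node then stats.2.2.2 + 1 else stats.2.2.2))) := by
      show ((T.getD node PySem.Set.empty).foldl _ _ : PySem.Set Int × (Int × Int × Int × Int)) = _
      have hP : ∀ (p : Prop) [Decidable p] (z : Int), (if p then z + 1 else z) = (z + if decide p then 1 else 0) := by
        intro p _ z; by_cases h : p <;> simp [h]
      simp only [pvP0, pvP1, pvP2, pvP3, pvAdjL, pvDeg]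
      by_cases h0 : (PySem.Int.mod node 2 = 1 ∧ PySem.Int.mod ((T.getD node PySem.Set.empty).length : Int) 2 = 1) <;>
      by_cases h1 : (PySem.Int.mod node 2 = 0 ∧ PySem.Int.mod ((T.getD node PySem.Set.empty).length : Int) 2 = 0) <;>
      by_cases h2 : (PySem.Int.mod node 2 = 1 ∧ PySem.Int.mod ((T.getD node PySem.Set.empty).length : Int) 2 = 0) <;>
      by_cases h3 : (PySem.Int.mod node 2 = 0 ∧ PySem.Int.mod ((T.getD node PySem.Set.empty).length : Int) 2 = 1) <;>
        simp [h0, h1, h2, h3]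
    by_cases hmemv : node ∈ visited
    · have hadd : PySem.Set.add visited node = visited := pvAdd_of_mem hmemv
      have hcontv : visited.contains node = true := by simpa [List.contains_eq_mem] using hmemv
      refine ⟨Δa, ?_, ?_, ?_, ?_, ?_⟩
      · rw [hunf, heq, hadd, hcontv]
        simp only [if_true, List.countP_cons]
        refine Prod.ext rfl (Prod.ext ?_ (Prod.ext ?_ (Prod.ext ?_ ?_))) <;>
          dsimp only <;> by_cases hp : pvP0 T node <;> by_cases hq : pvP1 T node <;>
          by_cases hr' : pvP2 T node <;> by_cases hs : pvP3 T node <;>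
          simp [hp, hq, hr', hs] <;> push_cast <;> ring
      · rwa [hadd] at hnd'
      · intro x hx
        obtain ⟨hxW, n, hn, hr⟩ := hre x hx
        exact ⟨hxW, Relation.ReflTransGen.head hn hr⟩
      · rw [hcontv]
        simp only [if_true]
        intro x hx y hy
        rcases List.mem_cons.mp hx with rfl | hx
        · rw [← hadd]; exact hmem y hy
        · rw [← hadd]; exact hcl x hx y hy
      · rw [← hadd]
        exact List.mem_append.mpr (Or.inl ((PySem.Set.mem_add visited node node).mpr (Or.inr rfl)))
    · have hadd : PySem.Set.add visited node = visited ++ [node] := pvAdd_of_not_mem hmemv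
      have hcontv : visited.contains node = false := by simpa [List.contains_eq_mem] using hmemv
      refine ⟨node :: Δa, ?_, ?_, ?_, ?_, ?_⟩
      · rw [hunf, heq, hadd, hcontv]
        simp only [Bool.false_eq_true, if_false, List.countP_cons, List.append_assoc,
          List.singleton_append]
        refine Prod.ext rfl (Prod.ext ?_ (Prod.ext ?_ (Prod.ext ?_ ?_))) <;>
          dsimp only <;> by_cases hp : pvP0 T node <;> by_cases hq : pvP1 T node <;>
          by_cases hr' : pvP2 T node <;> by_cases hs : pvP3 T node <;>
          simp [hp, hq, hr', hs] <;> push_cast <;> ring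
      · rw [hadd, List.append_assoc, List.singleton_append] at hnd'
        exact hnd'
      · intro x hx
        rcases List.mem_cons.mp hx with rfl | hx
        · exact ⟨hnW, Relation.ReflTransGen.refl⟩
        · obtain ⟨hxW, n, hn, hr⟩ := hre x hx
          exact ⟨hxW, Relation.ReflTransGen.head hn hr⟩
      · rw [hcontv]
        simp only [Bool.false_eq_true, if_false]
        intro x hx y hy
        have : y ∈ (visited ++ [node]) ++ Δa := by
          rcases List.mem_cons.mp hx with rfl | hx
          · rw [← hadd]; exact hmem y hy
          · rw [← hadd]; exact hcl x hx y hy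
        simpa [List.append_assoc] using this
      · exact List.mem_append.mpr (Or.inr (List.mem_cons_self ..))

-- ===== the BFS side =====

theorem pvBfs_spec (T : PySem.Dict Int (PySem.Set Int)) (W : List Int) (hWnd : W.Nodup)
    (hW : ∀ x y, y ∈ pvAdjL T x → y ∈ W) (v : Int) :
    ∀ (fuel : Nat) (i : Nat) (comp V₀ : List Int),
      (V₀ ++ comp).Nodup → i ≤ comp.length →
      (∀ x ∈ comp, pvReach T v x) →
      (∀ x ∈ comp.take i, ∀ y ∈ pvAdjL T x, y ∈ V₀ ++ comp) →
      (comp.length - i) + pvUnseen W (V₀ ++ comp) < fuel →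
      ∃ Δ : List Int,
        pvBfs T fuel i comp (V₀ ++ comp) = (comp ++ Δ, V₀ ++ (comp ++ Δ)) ∧
        (V₀ ++ (comp ++ Δ)).Nodup ∧
        (∀ x ∈ comp ++ Δ, pvReach T v x) ∧
        (∀ x ∈ comp ++ Δ, ∀ y ∈ pvAdjL T x, y ∈ V₀ ++ (comp ++ Δ)) := by
  have fold : ∀ (ws comp V₀ : List Int), (∀ w ∈ ws, w ∈ W) → (V₀ ++ comp).Nodup →
      ∃ δ : List Int,
        ws.foldl (fun (st : List Int × PySem.Set Int) w =>
            if PySem.Set.contains st.2 w then st else (st.1 ++ [w], PySem.Set.add st.2 w))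
          (comp, V₀ ++ comp) = (comp ++ δ, V₀ ++ (comp ++ δ)) ∧
        (V₀ ++ (comp ++ δ)).Nodup ∧ (∀ x ∈ δ, x ∈ ws) ∧
        (∀ w ∈ ws, w ∈ V₀ ++ (comp ++ δ)) ∧
        pvUnseen W (V₀ ++ (comp ++ δ)) + δ.length = pvUnseen W (V₀ ++ comp) := by
    intro ws
    induction ws with
    | nil => intro comp V₀ _ hnd; exact ⟨[], by simp, by simpa using hnd, by simp, by simp, by simp⟩
    | cons w ws ih =>
      intro comp V₀ hws hnd
      rw [List.foldl_cons]
      by_cases hw : w ∈ V₀ ++ comp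
      · have hg : PySem.Set.contains (V₀ ++ comp) w = true := (PySem.Set.contains_iff _ w).mpr hw
        rw [if_pos hg]
        obtain ⟨δ, heq, hnd', hsub, hmem, hcnt⟩ := ih comp V₀ (fun m hm => hws m (List.mem_cons_of_mem w hm)) hnd
        refine ⟨δ, heq, hnd', fun x hx => List.mem_cons_of_mem w (hsub x hx), ?_, hcnt⟩
        intro m hm
        rcases List.mem_cons.mp hm with rfl | hm
        · rcases List.mem_append.mp hw with h | h
          · exact List.mem_append.mpr (Or.inl h)
          · exact List.mem_append.mpr (Or.inr (List.mem_append.mpr (Or.inl h)))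
        · exact hmem m hm
      · have hg : PySem.Set.contains (V₀ ++ comp) w = false := by
          simp only [PySem.Set.contains, List.contains_eq_mem]
          simpa using hw
        rw [if_neg (by rw [hg]; simp)]
        have hadd : PySem.Set.add (V₀ ++ comp) w = V₀ ++ (comp ++ [w]) := by
          rw [pvAdd_of_not_mem hw, List.append_assoc]
        have hnd1 : (V₀ ++ (comp ++ [w])).Nodup := by
          rw [← List.append_assoc]
          refine List.Nodup.append hnd (by simp) ?_
          intro a ha hb
          simp only [List.mem_singleton] at hb
          exact hw (hb ▸ ha)
        have hcnt1 := pvUnseen_append_one hWnd (hws w (List.mem_cons_self ..)) hw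
        obtain ⟨δ, heq, hnd', hsub, hmem, hcnt⟩ :=
          ih (comp ++ [w]) V₀ (fun m hm => hws m (List.mem_cons_of_mem w hm)) hnd1
        rw [hadd]
        refine ⟨[w] ++ δ, ?_, ?_, ?_, ?_, ?_⟩
        · rw [heq]; simp [List.append_assoc]
        · simpa [List.append_assoc] using hnd'
        · intro x hx
          rcases List.mem_append.mp hx with hx | hx
          · simp only [List.mem_singleton] at hx
            exact hx ▸ List.mem_cons_self ..
          · exact List.mem_cons_of_mem w (hsub x hx)
        · intro m hm
          rcases List.mem_cons.mp hm with rfl | hm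
          · have h2 : m ∈ V₀ ++ ((comp ++ [m]) ++ δ) :=
              List.mem_append.mpr (Or.inr (List.mem_append.mpr (Or.inl (by simp))))
            simpa [List.append_assoc] using h2
          · simpa [List.append_assoc] using hmem m hm
        · have e1 : V₀ ++ (comp ++ ([w] ++ δ)) = V₀ ++ (comp ++ [w] ++ δ) := by
            simp [List.append_assoc]
          have e2 : V₀ ++ (comp ++ [w]) = V₀ ++ comp ++ [w] := by
            simp [List.append_assoc]
          have e3 : ([w] ++ δ).length = δ.length + 1 := by simp [Nat.add_comm]
          rw [e1, e3]
          rw [e2] at hcnt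
          omega
  intro fuel
  induction fuel with
  | zero => intro i comp V₀ _ _ _ _ hb; omega
  | succ fuel IH =>
    intro i comp V₀ hnd hi hv hcl hb
    by_cases hilt : i < comp.length
    · have hu : comp.getD i 0 ∈ comp := by
        rw [List.getD_eq_getElem comp 0 hilt]
        exact List.getElem_mem hilt
      have hunf : pvBfs T (fuel+1) i comp (V₀ ++ comp) =
          (let st := (pvAdjL T (comp.getD i 0)).foldl
            (fun (st : List Int × PySem.Set Int) w =>
              if PySem.Set.contains st.2 w then st else (st.1 ++ [w], PySem.Set.add st.2 w))
            (comp, V₀ ++ comp)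
           pvBfs T fuel (i+1) st.1 st.2) := by
        show (if i < comp.length then _ else _) = _
        rw [if_pos hilt]
        rfl
      obtain ⟨δ, heq, hnd1, hsub, hmemws, hcnt⟩ :=
        fold (pvAdjL T (comp.getD i 0)) comp V₀ (fun w hw => hW _ w hw) hnd
      have hreach1 : ∀ x ∈ comp ++ δ, pvReach T v x := by
        intro x hx
        rcases List.mem_append.mp hx with hx | hx
        · exact hv x hx
        · exact Relation.ReflTransGen.tail (hv _ hu) (hsub x hx)
      have hcl1 : ∀ x ∈ (comp ++ δ).take (i+1), ∀ y ∈ pvAdjL T x, y ∈ V₀ ++ (comp ++ δ) := by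
        intro x hx y hy
        rw [List.take_append_of_le_length (by omega)] at hx
        rw [List.take_succ] at hx
        rcases List.mem_append.mp hx with hx | hx
        · have h2 := hcl x hx y hy
          rcases List.mem_append.mp h2 with h | h
          · exact List.mem_append.mpr (Or.inl h)
          · exact List.mem_append.mpr (Or.inr (List.mem_append.mpr (Or.inl h)))
        · have hxu : x = comp.getD i 0 := by
            simp only [List.getElem?_eq_getElem hilt, Option.toList_some, List.mem_singleton] at hx
            rw [hx, List.getD_eq_getElem comp 0 hilt]
          exact hmemws y (hxu ▸ hy)
      have hb1 : ((comp ++ δ).length - (i+1)) + pvUnseen W (V₀ ++ (comp ++ δ)) < fuel := by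
        rw [List.length_append]
        omega
      obtain ⟨Δ', heq', hnd', hre', hcl'⟩ := IH (i+1) (comp ++ δ) V₀ hnd1 (by rw [List.length_append]; omega) hreach1 hcl1 hb1
      refine ⟨δ ++ Δ', ?_, ?_, ?_, ?_⟩
      · rw [hunf]
        simp only []
        rw [heq]
        simp only []
        rw [heq']
        simp [List.append_assoc]
      · simpa [List.append_assoc] using hnd'
      · intro x hx
        apply hre'
        simpa [List.append_assoc] using hx
      · intro x hx y hy
        have := hcl' x (by simpa [List.append_assoc] using hx) y hy
        simpa [List.append_assoc] using this
    · have hieq : i = comp.length := by omega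
      have hunf : pvBfs T (fuel+1) i comp (V₀ ++ comp) = (comp, V₀ ++ comp) := by
        show (if i < comp.length then _ else _) = _
        rw [if_neg hilt]
      refine ⟨[], by simpa using hunf, by simpa using hnd, by simpa using hv, ?_⟩
      intro x hx y hy
      have : x ∈ comp.take i := by rw [hieq, List.take_length]; simpa using hx
      simpa using hcl x this y hy

-- ===== outer loop =====

theorem pvOuter (T : PySem.Dict Int (PySem.Set Int)) (W : List Int) (hWnd : W.Nodup)
    (hW : ∀ x y, y ∈ pvAdjL T x → y ∈ W)
    (hsym : ∀ a b, b ∈ pvAdjL T a → a ∈ pvAdjL T b)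
    (F : Nat) (hF : W.length < F) :
    ∀ (ns : List Int) (VA VB : List Int) (a0 a1 : Int),
      (∀ n ∈ ns, n ∈ W) → VA.Nodup → VB.Nodup → (∀ x, x ∈ VA ↔ x ∈ VB) →
      (∀ x ∈ VA, ∀ y ∈ pvAdjL T x, y ∈ VA) →
      (ns.foldl
        (fun (st : PySem.Set Int × Int × Int) node =>
          if PySem.Set.contains st.1 node then st
          else
            ((pvCheckNode T F node (PySem.Set.add st.1 node) (0, 0, 0, 0)).1,
             if (pvCheckNode T F node (PySem.Set.add st.1 node) (0, 0, 0, 0)).2.1 +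
                (pvCheckNode T F node (PySem.Set.add st.1 node) (0, 0, 0, 0)).2.2.1 = 1
             then st.2.1 + 1 else st.2.1,
             if (pvCheckNode T F node (PySem.Set.add st.1 node) (0, 0, 0, 0)).2.2.2.1 +
                (pvCheckNode T F node (PySem.Set.add st.1 node) (0, 0, 0, 0)).2.2.2.2 = 1
             then st.2.2 + 1 else st.2.2)) (VA, a0, a1)).2 =
      (ns.foldl
        (fun (st : PySem.Set Int × Int × Int) v =>
          if PySem.Set.contains st.1 v then st
          else
            ((pvBfs T F 0 [v] (PySem.Set.add st.1 v)).2,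
             if ((((pvBfs T F 0 [v] (PySem.Set.add st.1 v)).1).countP (fun u =>
                  PySem.Int.mod u 2 == PySem.Int.mod ((T.getD u PySem.Set.empty).length : Int) 2) : Int)) = 1
             then st.2.1 + 1 else st.2.1,
             if (((pvBfs T F 0 [v] (PySem.Set.add st.1 v)).1).length : Int) -
                ((((pvBfs T F 0 [v] (PySem.Set.add st.1 v)).1).countP (fun u =>
                  PySem.Int.mod u 2 == PySem.Int.mod ((T.getD u PySem.Set.empty).length : Int) 2) : Int)) = 1
             then st.2.2 + 1 else st.2.2)) (VB, a0, a1)).2 := by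
  intro ns
  induction ns with
  | nil => intro VA VB a0 a1 _ _ _ _ _; rfl
  | cons node ns ih =>
    intro VA VB a0 a1 hns hndA hndB hiff hclA
    rw [List.foldl_cons, List.foldl_cons]
    have hnW : node ∈ W := hns node (List.mem_cons_self ..)
    by_cases hmem : node ∈ VA
    · have hgA : PySem.Set.contains VA node = true := (PySem.Set.contains_iff VA node).mpr hmem
      have hgB : PySem.Set.contains VB node = true := (PySem.Set.contains_iff VB node).mpr ((hiff node).mp hmem)
      rw [if_pos hgA, if_pos hgB]
      exact ih VA VB a0 a1 (fun m hm => hns m (List.mem_cons_of_mem node hm)) hndA hndB hiff hclA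
    · have hmemB : node ∉ VB := fun h => hmem ((hiff node).mpr h)
      have hgA : PySem.Set.contains VA node = false := by
        simp only [PySem.Set.contains, List.contains_eq_mem]; simpa using hmem
      have hgB : PySem.Set.contains VB node = false := by
        simp only [PySem.Set.contains, List.contains_eq_mem]; simpa using hmemB
      have hA' : ¬ (PySem.Set.contains VA node = true) := by rw [hgA]; simp
      have hB' : ¬ (PySem.Set.contains VB node = true) := by rw [hgB]; simp
      rw [if_neg hA', if_neg hB']
      -- A side: run the DFS spec
      have haddA : PySem.Set.add VA node = VA ++ [node] := pvAdd_of_not_mem hmem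
      have hndA1 : (VA ++ [node]).Nodup := by
        refine List.Nodup.append hndA (by simp) ?_
        intro a ha hb
        simp only [List.mem_singleton] at hb
        exact hmem (hb ▸ ha)
      have hbA : pvUnseen W (PySem.Set.add (PySem.Set.add VA node) node) < F := by
        have h1 : node ∈ PySem.Set.add VA node := (PySem.Set.mem_add VA node node).mpr (Or.inr rfl)
        rw [pvAdd_of_mem h1]
        have := pvUnseen_lt_length (V := PySem.Set.add VA node) hnW h1
        omega
      obtain ⟨Δa, heqA, hndA', hreA, hclA', hselfA⟩ :=
        pvCheckNode_spec T W hW F node (PySem.Set.add VA node) (0, 0, 0, 0) hnW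
          (haddA ▸ hndA1) hbA
      have hcontA : List.contains (PySem.Set.add VA node) node = true := by
        rw [List.contains_eq_mem]
        simp [PySem.Set.mem_add]
      rw [hcontA] at heqA hclA'
      simp only [if_true] at heqA hclA'
      -- B side: run the BFS spec
      have haddB : PySem.Set.add VB node = VB ++ [node] := pvAdd_of_not_mem hmemB
      have hndB1 : (VB ++ [node]).Nodup := by
        refine List.Nodup.append hndB (by simp) ?_
        intro a ha hb
        simp only [List.mem_singleton] at hb
        exact hmemB (hb ▸ ha)
      have hbB : (([node] : List Int).length - 0) + pvUnseen W (VB ++ [node]) < F := by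
        have h1 : node ∈ VB ++ [node] := by simp
        have := pvUnseen_lt_length (V := VB ++ [node]) hnW h1
        simp only [List.length_singleton]
        omega
      obtain ⟨Δb, heqB, hndB', hreB, hclB'⟩ :=
        pvBfs_spec T W hWnd hW node F 0 [node] VB (by simpa using hndB1) (by simp)
          (by intro x hx; simp only [List.mem_singleton] at hx; exact hx ▸ Relation.ReflTransGen.refl)
          (by simp) hbB
      -- the two freshly visited sets both equal the reachable component
      set SA : List Int := node :: Δa with hSA
      set SB : List Int := node :: Δb with hSB
      have hndSA : SA.Nodup := by
        have : (VA ++ SA).Nodup := by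
          simpa [hSA, haddA, List.append_assoc] using hndA'
        exact this.of_append_right
      have hdisjA : ∀ x ∈ SA, x ∉ VA := by
        have : (VA ++ SA).Nodup := by simpa [hSA, haddA, List.append_assoc] using hndA'
        intro x hx
        exact fun hv => (List.disjoint_of_nodup_append this) hv hx
      have hreSA : ∀ x ∈ SA, pvReach T node x := by
        intro x hx
        rcases List.mem_cons.mp hx with rfl | hx
        · exact Relation.ReflTransGen.refl
        · exact (hreA x hx).2
      have hclSA : ∀ x ∈ SA, ∀ y ∈ pvAdjL T x, y ∈ VA ∨ y ∈ SA := by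
        intro x hx y hy
        have := hclA' x hx y hy
        have h2 : y ∈ VA ++ SA := by
          simpa [hSA, haddA, List.append_assoc] using this
        exact List.mem_append.mp h2
      have hSAiff : ∀ x, x ∈ SA ↔ pvReach T node x := by
        intro x
        constructor
        · exact hreSA x
        · exact pvComp_max T hsym VA SA hdisjA hclA hclSA (List.mem_cons_self ..) x
      have hndSB : SB.Nodup := by
        have : (VB ++ SB).Nodup := by simpa [hSB] using hndB'
        exact this.of_append_right
      have hdisjB : ∀ x ∈ SB, x ∉ VB := by
        have : (VB ++ SB).Nodup := by simpa [hSB] using hndB'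
        intro x hx
        exact fun hv => (List.disjoint_of_nodup_append this) hv hx
      have hclB : ∀ x ∈ VB, ∀ y ∈ pvAdjL T x, y ∈ VB := by
        intro x hx y hy
        exact (hiff y).mp (hclA x ((hiff x).mpr hx) y hy)
      have hclSB : ∀ x ∈ SB, ∀ y ∈ pvAdjL T x, y ∈ VB ∨ y ∈ SB := by
        intro x hx y hy
        have := hclB' x (by simpa [hSB] using hx) y hy
        have h2 : y ∈ VB ++ SB := by simpa [hSB] using this
        exact List.mem_append.mp h2
      have hSBiff : ∀ x, x ∈ SB ↔ pvReach T node x := by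
        intro x
        constructor
        · intro hx
          exact hreB x (by simpa [hSB] using hx)
        · exact pvComp_max T hsym VB SB hdisjB hclB hclSB (List.mem_cons_self ..) x
      have hSiff : ∀ x, x ∈ SA ↔ x ∈ SB := fun x => (hSAiff x).trans (hSBiff x).symm
      -- counts agree
      have hcB := pvCountP_perm_of_mem_iff hndSA hndSB hSiff (pvPB T)
      obtain ⟨hsplitA1, hsplitA2⟩ := pvCountP_split T SA
      -- assemble the two if-conditions
      have hcond1 : ((0:Int) + (SA.countP (pvP0 T) : Int) + ((0:Int) + (SA.countP (pvP1 T) : Int)) = 1)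
          ↔ ((SB.countP (pvPB T) : Int) = 1) := by
        rw [← hcB.1]
        omega
      have hcond2 : ((0:Int) + (SA.countP (pvP2 T) : Int) + ((0:Int) + (SA.countP (pvP3 T) : Int)) = 1)
          ↔ ((SB.length : Int) - (SB.countP (pvPB T) : Int) = 1) := by
        rw [← hcB.1, ← hcB.2]
        omega
      -- step both folds and close with ih
      rw [heqA]
      dsimp only
      rw [haddB, heqB]
      dsimp only
      simp only [List.singleton_append]
      rw [hSB] at hcond1 hcond2
      have hkB : List.countP (fun u =>
          PySem.Int.mod u 2 == PySem.Int.mod ((List.length (T.getD u PySem.Set.empty) : Nat) : Int) 2)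
            (node :: Δb) = List.countP (pvPB T) (node :: Δb) := rfl
      simp only [hkB]
      simp only [hcond1, hcond2]
      apply ih
      · exact fun m hm => hns m (List.mem_cons_of_mem node hm)
      · simpa [hSA, haddA, List.append_assoc] using hndA'
      · simpa [hSB] using hndB'
      · intro x
        constructor
        · intro hx
          have hx' : x ∈ VA ++ SA := by
            simpa [hSA, haddA, List.append_assoc] using hx
          rcases List.mem_append.mp hx' with h | h
          · have : x ∈ VB ++ SB := List.mem_append.mpr (Or.inl ((hiff x).mp h))
            simpa [hSB] using this
          · have : x ∈ VB ++ SB := List.mem_append.mpr (Or.inr ((hSiff x).mp h))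
            simpa [hSB] using this
        · intro hx
          have hx' : x ∈ VB ++ SB := by simpa [hSB] using hx
          have h2 : x ∈ VA ++ SA := by
            rcases List.mem_append.mp hx' with h | h
            · exact List.mem_append.mpr (Or.inl ((hiff x).mpr h))
            · exact List.mem_append.mpr (Or.inr ((hSiff x).mpr h))
          simpa [hSA, haddA, List.append_assoc] using h2
      · intro x hx y hy
        have hx' : x ∈ VA ++ SA := by simpa [hSA, haddA, List.append_assoc] using hx
        have hres : y ∈ VA ++ SA := by
          rcases List.mem_append.mp hx' with h | h
          · exact List.mem_append.mpr (Or.inl (hclA x h y hy))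
          · rcases hclSA x h y hy with h2 | h2
            · exact List.mem_append.mpr (Or.inl h2)
            · exact List.mem_append.mpr (Or.inr h2)
        simpa [hSA, haddA, List.append_assoc] using hres

theorem solution_eq_alt (nodes : List Int) (edges : List (List Int)) :
    solution nodes edges = solution_alt nodes edges := by
  have hAdj : pvAdj edges = pvTable edges := rfl
  have hWnd : (pvW nodes edges).Nodup := PySem.Set.nodup_ofList _
  have hW : ∀ x y, y ∈ pvAdjL (pvTable edges) x → y ∈ pvW nodes edges :=
    fun x y h => pvAdj_mem_W nodes edges h
  have hsym : ∀ a b, b ∈ pvAdjL (pvTable edges) a → a ∈ pvAdjL (pvTable edges) b :=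
    fun a b h => pvTable_sym edges h
  have hF : (pvW nodes edges).length < nodes.length + 2 * edges.length + 1 := by
    have := pvW_length_le nodes edges
    omega
  have h := pvOuter (pvTable edges) (pvW nodes edges) hWnd hW hsym
    (nodes.length + 2 * edges.length + 1) hF nodes PySem.Set.empty PySem.Set.empty 0 0
    (fun n hn => by
      unfold pvW
      rw [PySem.Set.mem_ofList]
      exact List.mem_append.mpr (Or.inl hn))
    (by simp [PySem.Set.empty]) (by simp [PySem.Set.empty]) (by simp) (by simp [PySem.Set.empty])
  unfold solution solution_alt
  rw [hAdj]
  simp only []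
  rw [congrArg Prod.fst (congrArg Prod.snd (congrArg _ rfl)), h]

-- ===== VERDICT (by name: the statement is the Claim_ definition above) =====
theorem solution_spec : Claim_equal_solution := by
  intro nodes edges _ _
  unfold Spec_solution
  exact solution_eq_alt nodes edges
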